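-- pv_equiv track=rewrite | github.com/hillerlab/TOGA | ucsc_browser_visualisation/generate_tab_files.py | format_as_ali
-- ===== SOURCE A (Python) =====
-- SPACE = "&nbsp;"
--
-- PLACE_HOLDER_EXON_MID = "".join([SPACE for _ in range(5)])
--
-- def parts(lst, n=3):
--     """Split an iterable into parts with size n."""
--     return [lst[i : i + n] for i in iter(range(0, len(lst), n))]
--
-- def format_as_ali(seq_1, seq_2, w=80):
--     """Format sequences as alignment."""
--     lines = ["<TT>"]
--     seq_zip = list(zip(seq_1, seq_2))
--     zip_parts = parts(seq_zip, w)
--     for part in zip_parts: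
--         upper_seq = "".join([x[0] for x in part])
--         lower_seq = "".join([x[1] for x in part])
--         seq_len = len(upper_seq)
--         middle = "".join(
--             [SPACE if upper_seq[i] != lower_seq[i] else "|" for i in range(seq_len)]
--         )
--         lines.append(f"ref:{SPACE}{upper_seq}<BR>")
--         lines.append(f"{PLACE_HOLDER_EXON_MID}{middle}<BR>")
--         lines.append(f"que:{SPACE}{lower_seq}<BR><BR>")
--     lines.append("</TT>")
--     return "".join(lines)
-- ===== SOURCE B (Python) =====
-- SPACE = "&nbsp;"
-- PLACE_HOLDER_EXON_MID = SPACE * 5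
--
--
-- def _block(ref, mid, que):
--     return f"ref:{SPACE}{ref}<BR>{PLACE_HOLDER_EXON_MID}{mid}<BR>que:{SPACE}{que}<BR><BR>"
--
--
-- def format_as_ali(seq_1, seq_2, w=80):
--     """Format sequences as alignment (streaming: flush a block whenever the buffer fills)."""
--     out = ["<TT>"]
--     ref, mid, que = "", "", ""
--     for a, b in zip(seq_1, seq_2):
--         ref += a
--         mid += "|" if a == b else SPACE
--         que += b
--         if len(ref) == w:
--             out.append(_block(ref, mid, que))
--             ref, mid, que = "", "", ""
--     if ref:
--         out.append(_block(ref, mid, que))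
--     out.append("</TT>")
--     return "".join(out)
-- ===== Notes on version B (the rewrite author's own statement) =====
-- stated objective: alternative
-- what changed: B replaces A's chunk-first strategy (split the zipped pair list into w-sized parts, then rebuild the three lines per part with separate passes and an index loop for the middle line) by a streaming single pass over the pairs with three line buffers that are flushed as a block each time they fill, so no slicing or chunk list exists at all.
-- intended difference: On negative w with two nonempty sequences A returns the bare '<TT></TT>' frame, silently dropping the whole alignment (range() with a negative step yields no chunks), while B returns the alignment as one unchunked block, the intended output since the sequences should not be lost. — e.g. on format_as_ali("A", "A", -1): A returns "<TT></TT>", B returns "<TT>ref:&nbsp;A<BR>&nbsp;&nbsp;&nbsp;&nbsp;&nbsp;|<BR>que:&nbsp;A<BR><BR></TT>"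
import Mathlib
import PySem

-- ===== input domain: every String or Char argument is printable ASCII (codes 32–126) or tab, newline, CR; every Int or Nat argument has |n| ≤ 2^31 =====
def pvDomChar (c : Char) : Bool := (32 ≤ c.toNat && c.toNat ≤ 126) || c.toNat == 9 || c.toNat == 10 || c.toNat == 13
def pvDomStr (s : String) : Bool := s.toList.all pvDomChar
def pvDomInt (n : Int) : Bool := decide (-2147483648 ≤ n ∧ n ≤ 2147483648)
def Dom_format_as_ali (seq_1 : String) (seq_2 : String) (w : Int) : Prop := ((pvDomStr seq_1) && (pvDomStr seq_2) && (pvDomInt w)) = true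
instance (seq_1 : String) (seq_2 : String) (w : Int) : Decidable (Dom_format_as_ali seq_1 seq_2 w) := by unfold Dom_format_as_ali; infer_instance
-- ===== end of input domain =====

-- B replaces A's chunk-the-pairs-then-format strategy by a streaming single pass with three line
-- buffers flushed whenever they fill (objective: alternative decomposition, same asymptotic cost).

-- ===== PORT A =====
def pvSPACE : List Char := "&nbsp;".toList

def pvPH : List Char := (List.replicate 5 pvSPACE).flatten   -- "".join([SPACE for _ in range(5)])

-- parts(lst, n): [lst[i : i + n] for i in range(0, len(lst), n)]
def pvParts {α : Type} (lst : List α) (n : Int) : List (List α) :=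
  (PySem.List.pyRange 0 lst.length n).map (fun i => PySem.List.slice lst (some i) (some (i + n)))

def format_as_ali (seq_1 : String) (seq_2 : String) (w : Int) : String :=
  let seq_zip := seq_1.toList.zip seq_2.toList
  let zip_parts := pvParts seq_zip w
  let lines := zip_parts.foldl (fun (lines : List (List Char)) part =>
    let upper_seq := part.map Prod.fst
    let lower_seq := part.map Prod.snd
    let seq_len := upper_seq.length
    -- upper_seq[i] / lower_seq[i]: i ∈ range(seq_len) is always in range, so getD is exact here
    let middle := ((List.range seq_len).map
      (fun i => if upper_seq.getD i ' ' ≠ lower_seq.getD i ' ' then pvSPACE else ['|'])).flatten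
    lines ++ ["ref:".toList ++ pvSPACE ++ upper_seq ++ "<BR>".toList]
          ++ [pvPH ++ middle ++ "<BR>".toList]
          ++ ["que:".toList ++ pvSPACE ++ lower_seq ++ "<BR>".toList ++ "<BR>".toList])
    ["<TT>".toList]
  String.ofList ((lines ++ ["</TT>".toList]).flatten)

-- ===== PORT B =====
-- "|" if a == b else SPACE
def pvTok (p : Char × Char) : List Char := if p.1 == p.2 then ['|'] else pvSPACE

-- helper _block(ref, mid, que) of Source B
def pvBlock (ref mid que : List Char) : List Char :=
  "ref:".toList ++ pvSPACE ++ ref ++ "<BR>".toList ++ pvPH ++ mid ++ "<BR>".toList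
    ++ "que:".toList ++ pvSPACE ++ que ++ "<BR><BR>".toList

-- the loop body of Source B: extend the three buffers, flush a block once the buffer is w wide
def pvStep (w : Int) (st : List (List Char) × List Char × List Char × List Char)
    (p : Char × Char) : List (List Char) × List Char × List Char × List Char :=
  let ref := st.2.1 ++ [p.1]
  let mid := st.2.2.1 ++ pvTok p
  let que := st.2.2.2 ++ [p.2]
  if (ref.length : Int) = w then (st.1 ++ [pvBlock ref mid que], [], [], [])
  else (st.1, ref, mid, que)

def format_as_ali_alt (seq_1 : String) (seq_2 : String) (w : Int) : String :=
  let st := (seq_1.toList.zip seq_2.toList).foldl (pvStep w) (["<TT>".toList], [], [], [])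
  let out := if st.2.1 ≠ [] then st.1 ++ [pvBlock st.2.1 st.2.2.1 st.2.2.2] else st.1
  String.ofList ((out ++ ["</TT>".toList]).flatten)

-- ===== PRECONDITION & SPEC =====
-- Pre_ excludes only w = 0, where Python's range(0, len, 0) makes A raise ValueError.
def Pre_format_as_ali (seq_1 : String) (seq_2 : String) (w : Int) : Prop := w ≠ 0
instance (seq_1 : String) (seq_2 : String) (w : Int) : Decidable (Pre_format_as_ali seq_1 seq_2 w) := by unfold Pre_format_as_ali; infer_instance

def pvWitness_format_as_ali : String × String × Int := ("ACGT", "ACTT", 2)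

-- On negative w with two nonempty sequences A returns the bare '<TT></TT>' frame, silently dropping
-- the whole alignment (range() with a negative step yields no chunks), while B returns the alignment
-- as one unchunked block — the intended output, since the sequences should not be lost.
def D_format_as_ali (seq_1 : String) (seq_2 : String) (w : Int) : Prop :=
  w < 0 ∧ seq_1 ≠ "" ∧ seq_2 ≠ ""
instance (seq_1 : String) (seq_2 : String) (w : Int) : Decidable (D_format_as_ali seq_1 seq_2 w) := by unfold D_format_as_ali; infer_instance

def Spec_format_as_ali (seq_1 : String) (seq_2 : String) (w : Int) (out : String) : Prop := ¬ D_format_as_ali seq_1 seq_2 w → out = format_as_ali_alt seq_1 seq_2 w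
instance (seq_1 : String) (seq_2 : String) (w : Int) (out : String) : Decidable (Spec_format_as_ali seq_1 seq_2 w out) := by unfold Spec_format_as_ali; infer_instance

def pvDiffWitness_format_as_ali : String × String × Int := ("A", "A", -1)
def pvDiffWitnessOut_format_as_ali : String × String :=
  ("<TT></TT>", "<TT>ref:&nbsp;A<BR>&nbsp;&nbsp;&nbsp;&nbsp;&nbsp;|<BR>que:&nbsp;A<BR><BR></TT>")

-- ===== CLAIM (what is proved, stated in full; the proofs are below) =====
def Claim_unchanged_format_as_ali : Prop := ∀ (seq_1 : String) (seq_2 : String) (w : Int), Dom_format_as_ali seq_1 seq_2 w → Pre_format_as_ali seq_1 seq_2 w → Spec_format_as_ali seq_1 seq_2 w (format_as_ali seq_1 seq_2 w)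

def Claim_changed_format_as_ali : Prop := Dom_format_as_ali (pvDiffWitness_format_as_ali.1) (pvDiffWitness_format_as_ali.2.1) (pvDiffWitness_format_as_ali.2.2) ∧ Pre_format_as_ali (pvDiffWitness_format_as_ali.1) (pvDiffWitness_format_as_ali.2.1) (pvDiffWitness_format_as_ali.2.2) ∧ D_format_as_ali (pvDiffWitness_format_as_ali.1) (pvDiffWitness_format_as_ali.2.1) (pvDiffWitness_format_as_ali.2.2) ∧ format_as_ali (pvDiffWitness_format_as_ali.1) (pvDiffWitness_format_as_ali.2.1) (pvDiffWitness_format_as_ali.2.2) = pvDiffWitnessOut_format_as_ali.1 ∧ format_as_ali_alt (pvDiffWitness_format_as_ali.1) (pvDiffWitness_format_as_ali.2.1) (pvDiffWitness_format_as_ali.2.2) = pvDiffWitnessOut_format_as_ali.2 ∧ pvDiffWitnessOut_format_as_ali.1 ≠ pvDiffWitnessOut_format_as_ali.2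

def Claim_exact_format_as_ali : Prop := ∀ (seq_1 : String) (seq_2 : String) (w : Int), Dom_format_as_ali seq_1 seq_2 w → Pre_format_as_ali seq_1 seq_2 w → D_format_as_ali seq_1 seq_2 w → format_as_ali seq_1 seq_2 w ≠ format_as_ali_alt seq_1 seq_2 w

-- ===== LEMMAS AND PROOFS =====

-- proof-side chunking: windows of width V+1 (used with V = w.toNat - 1, i.e. width w)
def pvChunks {α : Type} (V : Nat) (l : List α) : List (List α) :=
  if h : l = [] then [] else l.take (V + 1) :: pvChunks V (l.drop (V + 1))
termination_by l.length
decreasing_by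
  simp only [List.length_drop]
  have : 0 < l.length := List.length_pos_of_ne_nil h
  omega

-- the block a window of pairs produces
def pvBlockOf (c : List (Char × Char)) : List Char :=
  pvBlock (c.map Prod.fst) ((c.map pvTok).flatten) (c.map Prod.snd)

-- A's three lines for one part, as a list of lines
def pvGA (part : List (Char × Char)) : List (List Char) :=
  [ "ref:".toList ++ pvSPACE ++ part.map Prod.fst ++ "<BR>".toList,
    pvPH ++ (part.map pvTok).flatten ++ "<BR>".toList,
    "que:".toList ++ pvSPACE ++ part.map Prod.snd ++ "<BR>".toList ++ "<BR>".toList ]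

theorem pvChunks_nil {α : Type} (V : Nat) : pvChunks V ([] : List α) = [] := by
  rw [pvChunks]; simp

theorem pvChunks_cons {α : Type} (V : Nat) (l : List α) (h : l ≠ []) :
    pvChunks V l = l.take (V + 1) :: pvChunks V (l.drop (V + 1)) := by
  rw [pvChunks]; simp [h]

-- ceil-division window count: one window plus the windows of the rest
theorem count_eq (W n : Nat) (hW : 1 ≤ W) (hn : 0 < n) :
    (((n : Int) - 0 + (W : Int) - 1) / (W : Int)).toNat
      = (if (0:Int) < ((n - W : Nat) : Int) then (((n - W : Nat) : Int) - 0 + (W:Int) - 1) / (W:Int) else 0).toNat + 1 := by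
  have h1 : ((n : Int) - 0 + (W : Int) - 1) = ((n + W - 1 : Nat) : Int) := by omega
  rw [h1, ← Int.natCast_div, Int.toNat_natCast]
  by_cases hc : W < n
  · have hc2 : (0:Int) < ((n - W : Nat) : Int) := by
      have : 0 < n - W := by omega
      exact_mod_cast this
    rw [if_pos hc2]
    have h2 : (((n - W : Nat) : Int) - 0 + (W:Int) - 1) = (((n - W) + W - 1 : Nat) : Int) := by omega
    rw [h2, ← Int.natCast_div, Int.toNat_natCast]
    have h3 : n + W - 1 = ((n - W) + W - 1) + W := by omega
    rw [h3, Nat.add_div_right _ (by omega)]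
  · have hc2 : ¬ (0:Int) < ((n - W : Nat) : Int) := by
      have : n - W = 0 := by omega
      simp [this]
    rw [if_neg hc2]
    have : (n + W - 1) / W = 1 := by
      apply Nat.div_eq_of_lt_le <;> omega
    omega

theorem parts_nil {α : Type} (w : Int) : pvParts ([] : List α) w = [] := by
  simp only [pvParts, List.length_nil]
  rw [show ((0 : Nat) : Int) = (0 : Int) by norm_num]
  simp [PySem.List.pyRange]

-- peeling one window off pvParts
theorem parts_cons {α : Type} (w : Int) (hw : 1 ≤ w) (zs : List α) (hz : zs ≠ []) :
    pvParts zs w = zs.take w.toNat :: pvParts (zs.drop w.toNat) w := by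
  have hw0 : 0 < w := hw
  set W := w.toNat with hWdef
  have hWw : (W : Int) = w := Int.toNat_of_nonneg (by omega)
  have hW1 : 1 ≤ W := by omega
  have hn : 0 < zs.length := List.length_pos_of_ne_nil hz
  unfold pvParts
  rw [PySem.List.pyRange_of_pos _ _ hw0, PySem.List.pyRange_of_pos _ _ hw0]
  rw [if_pos (by exact_mod_cast hn), List.length_drop]
  rw [← hWw, count_eq W zs.length hW1 hn]
  rw [List.range_succ_eq_map]
  simp only [List.map_cons, List.map_map, Function.comp_def, apply_ite Int.toNat, Int.toNat_zero]
  congr 1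
  · have e0 : (0 + (W:Int) * ((0:Nat):Int)) = ((0:Nat) : Int) := by push_cast; ring
    rw [e0]
    have e1 : ((0:Nat):Int) + (W:Int) = ((W:Nat):Int) := by push_cast; ring
    rw [e1, PySem.List.slice_natCast]
    simp
  · apply List.map_congr_left
    intro x _
    have e1 : (0 + (W:Int) * ((Nat.succ x : Nat):Int)) = ((W*(x+1) : Nat):Int) := by push_cast; ring
    have e2 : (0 + (W:Int) * ((x:Nat):Int)) = ((W*x : Nat):Int) := by push_cast; ring
    rw [e1, e2]
    rw [show ((W*(x+1) : Nat):Int) + (W:Int) = ((W*(x+1):Nat):Int) + ((W:Nat):Int) by norm_cast]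
    rw [show ((W*x : Nat):Int) + (W:Int) = ((W*x:Nat):Int) + ((W:Nat):Int) by norm_cast]
    rw [PySem.List.slice_natCast_add, PySem.List.slice_natCast_add]
    rw [List.drop_drop]
    congr 2
    ring

theorem parts_eq_chunks {α : Type} (w : Int) (hw : 1 ≤ w) (zs : List α) :
    pvParts zs w = pvChunks (w.toNat - 1) zs := by
  suffices h : ∀ (m : Nat) (l : List α), l.length ≤ m → pvParts l w = pvChunks (w.toNat - 1) l from
    h zs.length zs le_rfl
  intro m
  induction m with
  | zero =>
    intro l hl
    have : l = [] := List.eq_nil_of_length_eq_zero (by omega)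
    subst this
    rw [pvChunks_nil]
    exact parts_nil w
  | succ m ih =>
    intro l hl
    by_cases h : l = []
    · subst h; rw [pvChunks_nil]; exact parts_nil w
    · rw [parts_cons w hw l h, pvChunks_cons _ _ h]
      rw [show w.toNat - 1 + 1 = w.toNat by omega]
      congr 1
      apply ih
      have : 0 < l.length := List.length_pos_of_ne_nil h
      simp only [List.length_drop]
      omega

-- A's index-driven middle line over a part equals the mapped tokens
theorem middle_eq (part : List (Char × Char)) :
    (List.range part.length).map
      (fun i => if (part.map Prod.fst).getD i ' ' ≠ (part.map Prod.snd).getD i ' '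
                then pvSPACE else ['|'])
    = part.map pvTok := by
  apply List.ext_getElem
  · simp
  · intro i h1 h2
    simp only [List.length_map, List.length_range] at h1 h2
    simp only [List.getElem_map, List.getElem_range,
      List.getD_eq_getElem?_getD, List.getElem?_map]
    rw [List.getElem?_eq_getElem h2]
    simp only [Option.map_some, Option.getD_some, pvTok]
    rcases part[i] with ⟨a, b⟩
    by_cases hab : a = b <;> simp [hab]

-- the three per-part lines of A flatten to the one block string of B
theorem flat_blocks (P : List (List (Char × Char))) :
    (P.flatMap pvGA).flatten = (P.map pvBlockOf).flatten := by
  have hbr : ("<BR><BR>".toList : List Char) = "<BR>".toList ++ "<BR>".toList := by decide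
  induction P with
  | nil => simp
  | cons c P ih =>
    simp only [List.flatMap_cons, List.map_cons, List.flatten_append, List.flatten_cons, ih]
    simp [pvGA, pvBlockOf, pvBlock, hbr, List.append_assoc]

-- one step of B's fold on buffers that hold the pairs p
theorem pvStep_eq (w : Int) (out : List (List Char)) (p : List (Char × Char)) (z : Char × Char) :
    pvStep w (out, p.map Prod.fst, (p.map pvTok).flatten, p.map Prod.snd) z
      = (if ((p.length : Int) + 1 = w) then
           (out ++ [pvBlockOf (p ++ [z])], [], [], [])
         else (out, (p ++ [z]).map Prod.fst, ((p ++ [z]).map pvTok).flatten, (p ++ [z]).map Prod.snd)) := by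
  simp only [pvStep, pvBlockOf, List.map_append, List.flatten_append, List.length_append,
    List.length_map, List.map_cons, List.map_nil, List.flatten_cons, List.flatten_nil,
    List.append_nil, List.length_cons, List.length_nil]
  push_cast
  rfl

-- when w is negative the flush condition can never fire: the fold only grows the buffers
theorem stream_noflush (w : Int) (hw : w < 0) (zs : List (Char × Char)) :
    ∀ (p : List (Char × Char)) (out : List (List Char)),
    zs.foldl (pvStep w) (out, p.map Prod.fst, (p.map pvTok).flatten, p.map Prod.snd)
      = (out, (p ++ zs).map Prod.fst, ((p ++ zs).map pvTok).flatten, (p ++ zs).map Prod.snd) := by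
  induction zs with
  | nil => intro p out; simp
  | cons z zs ih =>
    intro p out
    simp only [List.foldl_cons]
    rw [pvStep_eq w out p z, if_neg (by omega)]
    rw [ih (p ++ [z]) out]
    simp

-- when w is negative range(0, len, w) is empty, so A builds no parts at all
theorem parts_neg {α : Type} (w : Int) (hw : w < 0) (zs : List α) : pvParts zs w = [] := by
  unfold pvParts
  have h : PySem.List.pyRange 0 (zs.length : Int) w = [] := by
    unfold PySem.List.pyRange
    rw [if_neg (by omega), if_neg (by omega), if_neg (by omega)]
    simp
  rw [h]
  simp

-- B's streaming fold, started with buffers holding the pairs p, finishes as the blocks of p ++ zs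
theorem stream_run (w : Int) (hw : 1 ≤ w) (zs : List (Char × Char)) :
    ∀ (p : List (Char × Char)) (out : List (List Char)), (p.length : Int) + 1 ≤ w →
    (if (zs.foldl (pvStep w) (out, p.map Prod.fst, (p.map pvTok).flatten, p.map Prod.snd)).2.1 ≠ [] then
       (zs.foldl (pvStep w) (out, p.map Prod.fst, (p.map pvTok).flatten, p.map Prod.snd)).1
         ++ [pvBlock (zs.foldl (pvStep w) (out, p.map Prod.fst, (p.map pvTok).flatten, p.map Prod.snd)).2.1
              (zs.foldl (pvStep w) (out, p.map Prod.fst, (p.map pvTok).flatten, p.map Prod.snd)).2.2.1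
              (zs.foldl (pvStep w) (out, p.map Prod.fst, (p.map pvTok).flatten, p.map Prod.snd)).2.2.2]
     else (zs.foldl (pvStep w) (out, p.map Prod.fst, (p.map pvTok).flatten, p.map Prod.snd)).1)
    = out ++ (pvChunks (w.toNat - 1) (p ++ zs)).map pvBlockOf := by
  induction zs with
  | nil =>
    intro p out hp
    simp only [List.foldl_nil, List.append_nil]
    by_cases h : p = []
    · subst h; simp [pvChunks_nil]
    · have hmap : p.map Prod.fst ≠ [] := by simp [h]
      rw [if_pos hmap, pvChunks_cons _ _ h]
      have hlen : p.length ≤ w.toNat - 1 + 1 := by omega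
      rw [List.take_of_length_le hlen, List.drop_eq_nil_of_le hlen, pvChunks_nil]
      simp [pvBlockOf]
  | cons z zs ih =>
    intro p out hp
    simp only [List.foldl_cons]
    rw [pvStep_eq w out p z]
    by_cases hfl : (p.length : Int) + 1 = w
    · rw [if_pos hfl]
      have hih := ih [] (out ++ [pvBlockOf (p ++ [z])]) (by simpa using hw)
      simp only [List.map_nil, List.flatten_nil, List.nil_append] at hih
      rw [hih]
      have hne : p ++ z :: zs ≠ [] := by simp
      rw [pvChunks_cons _ _ hne]
      have hlen : (p ++ [z]).length = w.toNat - 1 + 1 := by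
        simp only [List.length_append, List.length_cons, List.length_nil]
        omega
      have hsplit : p ++ z :: zs = (p ++ [z]) ++ zs := by simp
      rw [hsplit, List.take_left' hlen, List.drop_left' hlen]
      simp
    · rw [if_neg hfl]
      have hlt : ((p ++ [z]).length : Int) + 1 ≤ w := by
        simp only [List.length_append, List.length_cons, List.length_nil]
        push_cast
        omega
      have hih := ih (p ++ [z]) out hlt
      rw [hih]
      congr 2
      simp

theorem format_A_eq (s1 s2 : String) (w : Int) (hw : 1 ≤ w) :
    format_as_ali s1 s2 w = String.ofList
      (((["<TT>".toList] ++ (pvChunks (w.toNat - 1) (s1.toList.zip s2.toList)).map pvBlockOf)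
        ++ ["</TT>".toList]).flatten) := by
  unfold format_as_ali
  dsimp only
  rw [parts_eq_chunks w hw]
  rw [PySem.List.foldl_congr_mem _ _ (fun lines part => lines ++ pvGA part) _
    (by
      intro acc part _
      simp only [pvGA, List.length_map]
      rw [middle_eq part]
      simp [List.append_assoc])]
  rw [PySem.List.foldl_append_eq_flatMap]
  apply congrArg
  simp only [List.flatten_append, flat_blocks]

theorem format_B_eq (s1 s2 : String) (w : Int) (hw : 1 ≤ w) :
    format_as_ali_alt s1 s2 w = String.ofList
      (((["<TT>".toList] ++ (pvChunks (w.toNat - 1) (s1.toList.zip s2.toList)).map pvBlockOf)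
        ++ ["</TT>".toList]).flatten) := by
  have h := stream_run w hw (s1.toList.zip s2.toList) [] ["<TT>".toList] (by simpa using hw)
  simp only [List.map_nil, List.flatten_nil, List.nil_append] at h
  unfold format_as_ali_alt
  dsimp only
  rw [h]

-- ===== VERDICT (by name: the statements are the Claim_ definitions above) =====
theorem format_as_ali_spec : Claim_unchanged_format_as_ali := by
  intro s1 s2 w _ hpre
  unfold Spec_format_as_ali
  intro hnd
  by_cases hw : 1 ≤ w
  · rw [format_A_eq s1 s2 w hw, format_B_eq s1 s2 w hw]
  · have hwneg : w < 0 := by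
      have : w ≠ 0 := hpre
      omega
    have hs : s1 = "" ∨ s2 = "" := by
      by_contra hc
      rw [not_or] at hc
      exact hnd ⟨hwneg, hc.1, hc.2⟩
    have hzip : s1.toList.zip s2.toList = [] := by
      rcases hs with h | h <;> simp [h]
    unfold format_as_ali format_as_ali_alt
    dsimp only
    rw [hzip, parts_nil]
    simp

theorem format_as_ali_changed : Claim_changed_format_as_ali := by
  unfold Claim_changed_format_as_ali
  refine ⟨by decide, by decide, by decide, by decide, by decide, by decide⟩

theorem format_as_ali_tight : Claim_exact_format_as_ali := by
  intro s1 s2 w _ _ hd heq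
  obtain ⟨hw, h1, h2⟩ := hd
  have hzip : s1.toList.zip s2.toList ≠ [] := by
    intro h
    rcases List.zip_eq_nil_iff.mp h with h | h
    · exact h1 (by ext1; simp [h])
    · exact h2 (by ext1; simp [h])
  -- A's side collapses to the bare frame
  have hA : format_as_ali s1 s2 w = String.ofList (([("<TT>".toList : List Char)] ++ ["</TT>".toList]).flatten) := by
    unfold format_as_ali
    dsimp only
    rw [parts_neg w hw]
    simp
  -- B's side keeps one block
  have hB : format_as_ali_alt s1 s2 w = String.ofList
      (((["<TT>".toList] ++ [pvBlock ((s1.toList.zip s2.toList).map Prod.fst)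
            (((s1.toList.zip s2.toList).map pvTok).flatten) ((s1.toList.zip s2.toList).map Prod.snd)])
        ++ ["</TT>".toList]).flatten) := by
    have h := stream_noflush w hw (s1.toList.zip s2.toList) [] ["<TT>".toList]
    simp only [List.map_nil, List.flatten_nil, List.nil_append] at h
    unfold format_as_ali_alt
    dsimp only
    rw [h]
    rw [if_pos (by simpa using hzip)]
  rw [hA, hB] at heq
  have hlen := congrArg (fun t => t.toList.length) heq
  have e1 : ("ref:".toList : List Char).length = 4 := by decide
  have e2 : ("&nbsp;".toList : List Char).length = 6 := by decide
  have e3 : ("<BR>".toList : List Char).length = 4 := by decide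
  have e4 : ("que:".toList : List Char).length = 4 := by decide
  have e5 : ("<BR><BR>".toList : List Char).length = 8 := by decide
  have e6 : ("<TT>".toList : List Char).length = 4 := by decide
  have e7 : ("</TT>".toList : List Char).length = 5 := by decide
  have e8 : (pvPH : List Char).length = 30 := by decide
  simp only [String.toList_ofList, List.flatten_append, List.flatten_cons, List.flatten_nil,
    List.length_append, List.append_nil, pvBlock, pvSPACE, e1, e2, e3, e4, e5, e6, e7, e8] at hlen
  omega
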